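-- pv_equiv track=rewrite | github.com/ynotstartups/advent_of_code_2018 | t2/calc.py | n_of_a_letter
-- ===== SOURCE A (Python) =====
-- from collections import Counter
--
-- def n_of_a_letter(chars):
--     contains_two = False
--     contains_three = False
--     c = Counter(chars)
--     for _, number in c.most_common():
--         if number == 2:
--             contains_two = True
--         elif number == 3:
--             contains_three = True
--     return contains_two, contains_three
-- ===== SOURCE B (Python) =====
-- def n_of_a_letter(chars):
--     # sort-then-scan: walk consecutive runs of the sorted characters instead of hashing counts
--     s = sorted(chars)
--     contains_two = False
--     contains_three = False
--     i, n = 0, len(s)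
--     while i < n:
--         j = i + 1
--         while j < n and s[j] == s[i]:
--             j += 1
--         if j - i == 2:
--             contains_two = True
--         if j - i == 3:
--             contains_three = True
--         i = j
--     return contains_two, contains_three
-- ===== Notes on version B (the rewrite author's own statement) =====
-- stated objective: alternative
-- what changed: Replaces Counter hashing plus a most_common() pass with sorting the characters and scanning consecutive runs, deriving each letter's multiplicity from run lengths.
import Mathlib
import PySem

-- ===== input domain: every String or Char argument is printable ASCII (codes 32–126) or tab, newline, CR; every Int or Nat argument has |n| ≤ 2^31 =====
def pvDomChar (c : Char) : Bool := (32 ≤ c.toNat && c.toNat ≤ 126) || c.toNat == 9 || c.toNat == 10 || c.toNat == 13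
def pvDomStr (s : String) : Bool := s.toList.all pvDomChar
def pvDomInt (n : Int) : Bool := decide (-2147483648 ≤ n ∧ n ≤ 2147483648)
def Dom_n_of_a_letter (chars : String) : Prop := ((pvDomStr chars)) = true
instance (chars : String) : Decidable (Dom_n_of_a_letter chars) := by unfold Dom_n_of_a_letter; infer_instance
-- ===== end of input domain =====

-- B replaces Counter-based counting by a sort-then-scan over consecutive runs (alternative algorithm, no speed claim).

-- ===== PORT A =====
-- Counter(chars), then loop over most_common() = items sorted by count, descending, stable
def n_of_a_letter (chars : String) : Bool × Bool :=
  let c := PySem.Dict.counter chars.toList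
  (PySem.List.sorted c.items (fun kv => kv.2) true).foldl
    (fun st kv =>
      if kv.2 = 2 then (true, st.2)
      else if kv.2 = 3 then (st.1, true)
      else st)
    (false, false)

-- ===== PORT B =====
-- the outer while-loop of Source B: each step consumes one run of equal characters
-- (the inner `while s[j] == s[i]` is the takeWhile/dropWhile split)
def pvRunScan : List Char → Bool → Bool → Bool × Bool
  | [], t2, t3 => (t2, t3)
  | c :: rest, t2, t3 =>
      let run := 1 + (rest.takeWhile (· == c)).length
      pvRunScan (rest.dropWhile (· == c)) (t2 || run == 2) (t3 || run == 3)
termination_by l => l.length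
decreasing_by
  exact Nat.lt_succ_of_le (List.length_dropWhile_le ..)

def n_of_a_letter_alt (chars : String) : Bool × Bool :=
  pvRunScan (PySem.List.sorted chars.toList (fun x => x) false) false false

-- ===== PRECONDITION & SPEC =====
def Spec_n_of_a_letter (chars : String) (out : Bool × Bool) : Prop := out = n_of_a_letter_alt chars
instance (chars : String) (out : Bool × Bool) : Decidable (Spec_n_of_a_letter chars out) := by unfold Spec_n_of_a_letter; infer_instance

-- ===== CLAIM (what is proved, stated in full; the proofs are below) =====
def Claim_equal_n_of_a_letter : Prop := ∀ (chars : String), Dom_n_of_a_letter chars → Spec_n_of_a_letter chars (n_of_a_letter chars)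

-- ===== LEMMAS AND PROOFS =====

-- `any` is invariant under permutation
theorem pv_any_perm {α : Type} {l₁ l₂ : List α} {p : α → Bool} (h : l₁.Perm l₂) :
    l₁.any p = l₂.any p := by
  rw [Bool.eq_iff_iff]
  simp only [List.any_eq_true]
  exact ⟨fun ⟨x, hx, hp⟩ => ⟨x, h.mem_iff.mp hx, hp⟩,
         fun ⟨x, hx, hp⟩ => ⟨x, h.mem_iff.mpr hx, hp⟩⟩

-- A's loop, over an arbitrary item list
theorem pv_A_fold (lst : List (Char × Int)) (st : Bool × Bool) :
    lst.foldl (fun st kv =>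
      if kv.2 = 2 then (true, st.2)
      else if kv.2 = 3 then (st.1, true)
      else st) st
    = (st.1 || lst.any (fun kv => decide (kv.2 = 2)),
       st.2 || lst.any (fun kv => decide (kv.2 = 3))) := by
  induction lst generalizing st with
  | nil => simp
  | cons a t ih =>
      simp only [List.foldl_cons, List.any_cons]
      rw [ih]
      by_cases h2 : a.2 = 2 <;> by_cases h3 : a.2 = 3 <;>
        simp [h2, h3]

-- A computes: does some character's multiplicity equal 2 / equal 3?
theorem pv_A_char (chars : String) :
    n_of_a_letter chars
      = (decide (∃ x ∈ chars.toList, chars.toList.count x = 2),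
         decide (∃ x ∈ chars.toList, chars.toList.count x = 3)) := by
  set l := chars.toList with hl
  show (PySem.List.sorted (PySem.Dict.counter l).items (fun kv => kv.2) true).foldl _ _ = _
  rw [pv_A_fold]
  rw [pv_any_perm (PySem.List.sorted_perm ..), pv_any_perm (PySem.List.sorted_perm ..)]
  rw [PySem.Dict.items_counter]
  simp only [List.any_map, Function.comp_def, Bool.false_or]
  rw [Prod.ext_iff]
  constructor <;>
  · rw [Bool.eq_iff_iff]
    simp only [List.any_eq_true, PySem.Set.mem_ofList, decide_eq_true_eq]
    constructor <;> rintro ⟨x, hx, h⟩ <;> exact ⟨x, hx, by omega⟩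

-- the elements dropped past a run of c in a ≤-sorted list are all > c
theorem pv_drop_gt (c : Char) (rest : List Char) (hs : (c :: rest).Pairwise (· ≤ ·)) :
    ∀ x ∈ rest.dropWhile (· == c), c < x := by
  intro x hx
  rcases hd : rest.dropWhile (· == c) with _ | ⟨h0, d'⟩
  · simp [hd] at hx
  · have hne : (h0 == c) = false := by
      have := List.head?_dropWhile_not (· == c) rest
      rw [hd] at this
      simpa using this
    have hsub : (h0 :: d').Sublist rest := hd ▸ List.dropWhile_sublist (· == c)
    have hpd : (h0 :: d').Pairwise (· ≤ ·) :=
      List.Pairwise.sublist hsub (List.pairwise_cons.mp hs).2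
    have hch0 : c < h0 := by
      have hle : c ≤ h0 := (List.pairwise_cons.mp hs).1 h0 (hsub.subset (List.mem_cons_self ..))
      rcases lt_or_eq_of_le hle with h | h
      · exact h
      · exact absurd (beq_iff_eq.mpr h.symm) (by simp [hne])
    rw [hd] at hx
    rcases List.mem_cons.mp hx with h | h
    · exact h ▸ hch0
    · exact lt_of_lt_of_le hch0 ((List.pairwise_cons.mp hpd).1 x h)

-- B's scan on a ≤-sorted list
theorem pv_scan (s : List Char) (hs : s.Pairwise (· ≤ ·)) (t2 t3 : Bool) :
    pvRunScan s t2 t3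
      = (t2 || decide (∃ x ∈ s, s.count x = 2), t3 || decide (∃ x ∈ s, s.count x = 3)) := by
  induction hn : s.length using Nat.strong_induction_on generalizing s t2 t3 with
  | _ n ih =>
    match s, hs with
    | [], _ => simp [pvRunScan]
    | c :: rest, hs =>
      subst hn
      simp only [pvRunScan]
      set t := rest.takeWhile (· == c) with ht
      set d := rest.dropWhile (· == c) with hd
      have hsplit : rest = t ++ d := (List.takeWhile_append_dropWhile ..).symm
      have htc : ∀ x ∈ t, x = c := by
        intro x hx
        rw [ht] at hx
        have hp := List.mem_takeWhile_imp hx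
        exact beq_iff_eq.mp hp
      have hdgt : ∀ x ∈ d, c < x := pv_drop_gt c rest hs
      have hdpair : d.Pairwise (· ≤ ·) :=
        List.Pairwise.sublist (List.dropWhile_sublist _) (List.pairwise_cons.mp hs).2
      have hdlen : d.length < (c :: rest).length := by
        have := List.length_dropWhile_le (p := (· == c)) (l := rest)
        rw [← hd] at this
        simp only [List.length_cons]
        omega
      -- count of c in the whole list is the run length
      have hcount_c : (c :: rest).count c = 1 + t.length := by
        have h1 : t.count c = t.length := List.count_eq_length.mpr (by
          intro x hx; exact (htc x hx).symm)
        have h2 : d.count c = 0 := List.count_eq_zero.mpr (fun hc => lt_irrefl c (hdgt c hc))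
        rw [hsplit]
        simp [List.count_append, h1, h2]
        omega
      -- counts of later characters are unaffected by the dropped run
      have hcount_d : ∀ x ∈ d, (c :: rest).count x = d.count x := by
        intro x hx
        have hxc : x ≠ c := fun h => lt_irrefl c (h ▸ hdgt x hx)
        have h1 : t.count x = 0 := List.count_eq_zero.mpr (fun hc => hxc (htc x hc))
        rw [hsplit]
        simp [List.count_append, h1, Ne.symm hxc]
      have hex : ∀ m : Nat, (∃ x ∈ c :: rest, (c :: rest).count x = m)
          ↔ (1 + t.length = m ∨ ∃ x ∈ d, d.count x = m) := by
        intro m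
        constructor
        · rintro ⟨x, hx, hcnt⟩
          rcases List.mem_cons.mp hx with h | h
          · subst h
            exact Or.inl (hcount_c ▸ hcnt)
          · rw [hsplit] at h
            rcases List.mem_append.mp h with h | h
            · have := htc x h
              subst this
              exact Or.inl (hcount_c ▸ hcnt)
            · exact Or.inr ⟨x, h, (hcount_d x h) ▸ hcnt⟩
        · rintro (h | ⟨x, hx, hcnt⟩)
          · exact ⟨c, List.mem_cons_self .., hcount_c.trans h⟩
          · refine ⟨x, ?_, (hcount_d x hx).trans hcnt⟩
            exact List.mem_cons_of_mem _ (hsplit ▸ List.mem_append_right _ hx)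
      rw [ih d.length hdlen d hdpair _ _ rfl]
      refine Prod.ext ?_ ?_ <;>
      · rw [Bool.eq_iff_iff]
        simp only [Bool.or_eq_true, decide_eq_true_eq, beq_iff_eq, hex]
        tauto

theorem pv_B_char (chars : String) :
    n_of_a_letter_alt chars
      = (decide (∃ x ∈ chars.toList, chars.toList.count x = 2),
         decide (∃ x ∈ chars.toList, chars.toList.count x = 3)) := by
  unfold n_of_a_letter_alt
  have hperm : (PySem.List.sorted chars.toList (fun x => x) false).Perm chars.toList :=
    PySem.List.sorted_perm ..
  rw [pv_scan _ (by
    have := PySem.List.sorted_pairwise (xs := chars.toList) (key := fun x => x)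
    simpa using this)]
  simp only [Bool.false_or]
  rw [Prod.ext_iff]
  constructor <;>
  · rw [Bool.eq_iff_iff]
    simp only [decide_eq_true_eq]
    exact exists_congr fun x =>
      and_congr (by rw [hperm.mem_iff]) (by rw [hperm.count_eq])

-- ===== VERDICT (by name: the statement is the Claim_ definition above) =====
theorem n_of_a_letter_spec : Claim_equal_n_of_a_letter := by
  intro chars _
  unfold Spec_n_of_a_letter
  rw [pv_A_char, pv_B_char]
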